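-- pv_equiv track=rewrite | github.com/nohlachilders/advent-of-code-2024 | src/day09.py | format_disk
-- ===== SOURCE A (Python) =====
-- def format_disk(disk):
--     formatted = []
--     j = 0
--     for char in disk:
--         formatted.append(char)
--     for i in range(len(formatted)-1,0,-1):
--         if formatted[i] != ".":
--             flag = True
--             while flag:
--                 if j >= len(formatted)-1 or j >= i:
--                     flag = False
--                 else:
--                     if formatted[j] == "." and j < i:
--                         formatted[i], formatted[j] = formatted[j], formatted[i]
--                         #break while
--                         flag = False
--                     j = min(len(formatted)-1, j + 1)
--     return formatted
-- ===== SOURCE B (Python) =====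
-- def format_disk(disk):
--     disk = list(disk)
--     n = len(disk) - disk.count(".")
--     fills = iter(c for c in reversed(disk[n:]) if c != ".")
--     out = [c if c != "." else next(fills) for c in disk[:n]]
--     out.extend(["."] * (len(disk) - n))
--     return out
-- ===== Notes on version B (the rewrite author's own statement) =====
-- stated objective: simpler
-- what changed: A compacts in place with two converging indices (outer i scanning down, persistent j scanning up, nested while with a flag, swapping elements); B instead counts the non-dot entries n, filters the non-dot chars out of disk[n:] in reverse and builds a fresh list in one comprehension pass over disk[:n], appending the trailing dots in closed form.
import Mathlib
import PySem

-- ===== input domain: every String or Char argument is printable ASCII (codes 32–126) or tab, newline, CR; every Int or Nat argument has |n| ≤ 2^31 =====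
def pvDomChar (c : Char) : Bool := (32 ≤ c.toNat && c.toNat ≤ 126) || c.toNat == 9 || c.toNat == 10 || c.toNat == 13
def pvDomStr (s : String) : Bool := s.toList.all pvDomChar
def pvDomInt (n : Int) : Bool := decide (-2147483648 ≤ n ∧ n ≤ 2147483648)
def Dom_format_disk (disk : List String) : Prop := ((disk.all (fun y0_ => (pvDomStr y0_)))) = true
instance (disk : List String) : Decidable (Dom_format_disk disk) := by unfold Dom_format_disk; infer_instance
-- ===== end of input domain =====

-- B replaces A's in-place swapping with two converging indices by a one-pass fill: it
-- filters the non-dot chars out of the tail and streams them into the gaps of the head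
-- (objective: simpler decomposition, same cost).

-- ===== PORT A =====
-- 'formatted[i], formatted[j] = formatted[j], formatted[i]'; pyGetD/set are exact here
-- because the loop keeps 0 ≤ j < len(formatted)-1 and 1 ≤ i < len(formatted)
def pvSwapA (fm : List String) (i j : Int) : List String :=
  (fm.set i.toNat (PySem.List.pyGetD fm j "")).set j.toNat (PySem.List.pyGetD fm i "")

-- the 'while flag:' loop; called with fuel = len(formatted)+1, which strictly exceeds the
-- possible number of iterations (each continuing iteration has j < len-1 and increments j),
-- so the fuel-0 branch is unreachable
def pvWhileA (fm : List String) (i : Int) (j : Int) : Nat → List String × Int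
  | 0 => (fm, j)
  | fuel+1 =>
    if j ≥ (fm.length : Int) - 1 ∨ j ≥ i then (fm, j)
    else if PySem.List.pyGetD fm j "" = "." ∧ j < i then
      (pvSwapA fm i j, min ((fm.length : Int) - 1) (j + 1))
    else pvWhileA fm i (min ((fm.length : Int) - 1) (j + 1)) fuel

def format_disk (disk : List String) : List String :=
  let formatted := disk.foldl (fun acc c => acc ++ [c]) []
  ((PySem.List.pyRange ((formatted.length : Int) - 1) 0 (-1)).foldl
    (fun (st : List String × Int) i =>
      if PySem.List.pyGetD st.1 i "" ≠ "." then pvWhileA st.1 i st.2 (st.1.length + 1) else st)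
    (formatted, 0)).1

-- ===== PORT B =====
-- 'c if c != "." else next(fills)' consuming the generator; the generator is never
-- exhausted (each '.' in disk[:n] is matched by a non-dot in disk[n:]), so the
-- headD default is unreachable
def pvFillB (front : List String) (fills : List String) : List String :=
  match front with
  | [] => []
  | c :: rest =>
    if c ≠ "." then c :: pvFillB rest fills
    else fills.headD "." :: pvFillB rest fills.tail

def format_disk_alt (disk : List String) : List String :=
  -- n = len(disk) - disk.count("."); count ≤ len, so Nat subtraction is exact
  let n : Nat := disk.length - PySem.List.count disk "."
  let fills := ((PySem.List.slice disk (some (n : Int)) none).reverse).filter (fun c => c != ".")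
  pvFillB (PySem.List.slice disk none (some (n : Int))) fills
    ++ List.replicate (disk.length - n) "."

-- ===== PRECONDITION & SPEC =====
def Spec_format_disk (disk : List String) (out : List String) : Prop := out = format_disk_alt disk
instance (disk : List String) (out : List String) : Decidable (Spec_format_disk disk out) := by unfold Spec_format_disk; infer_instance

-- ===== CLAIM (what is proved, stated in full; the proofs are below) =====
def Claim_equal_format_disk : Prop := ∀ (disk : List String), Dom_format_disk disk → Spec_format_disk disk (format_disk disk)

-- ===== LEMMAS AND PROOFS =====

lemma pvLen_sub_count (fm : List String) :
    fm.length - PySem.List.count fm "." = (fm.filter (fun c => c != ".")).length := by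
  rw [PySem.List.count_eq]
  induction fm with
  | nil => rfl
  | cons x t ih =>
    have hcle : List.count "." t ≤ t.length := List.count_le_length
    by_cases hx : x = "."
    · subst hx
      simp only [List.length_cons, List.count_cons, List.filter_cons]
      simp only [BEq.rfl, if_true, bne_self_eq_false, Bool.false_eq_true, if_false]
      omega
    · simp only [List.length_cons, List.count_cons, List.filter_cons]
      have h1 : (x == ".") = false := by simpa using hx
      have h2 : (x != ".") = true := by simpa using hx
      rw [h1, h2]
      simp only [Bool.false_eq_true, if_false, if_true, List.length_cons]
      omega

-- closed form of B's port: take/drop at n = number of non-dot entries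
lemma pvAlt_eq (fm : List String) :
    format_disk_alt fm =
      pvFillB (fm.take ((fm.filter (fun c => c != ".")).length))
          (((fm.drop ((fm.filter (fun c => c != ".")).length)).reverse).filter (fun c => c != "."))
        ++ List.replicate (fm.length - (fm.filter (fun c => c != ".")).length) "." := by
  simp only [format_disk_alt, pvLen_sub_count, PySem.List.slice_to_natCast,
    PySem.List.slice_from_natCast]

-- fillB walks over an all-non-dot prefix untouched
lemma pvFillB_append_nondot (u : List String) (rest fills : List String)
    (hu : ∀ x ∈ u, x ≠ ".") :
    pvFillB (u ++ rest) fills = u ++ pvFillB rest fills := by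
  induction u with
  | nil => rfl
  | cons c u ih =>
    have hc : c ≠ "." := hu c (by simp)
    simp only [List.cons_append, pvFillB, if_pos hc]
    rw [ih (fun x hx => hu x (by simp [hx]))]

-- B is the identity on an already compacted list (non-dots then dots)
lemma pvAlt_sorted_fix (u w : List String)
    (hu : ∀ x ∈ u, x ≠ ".") (hw : ∀ x ∈ w, x = ".") :
    format_disk_alt (u ++ w) = u ++ w := by
  have hfu : u.filter (fun c => c != ".") = u :=
    List.filter_eq_self.mpr (fun a ha => by simpa using hu a ha)
  have hfw : w.filter (fun c => c != ".") = [] :=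
    List.filter_eq_nil_iff.mpr (fun a ha => by simpa using hw a ha)
  rw [pvAlt_eq]
  have hn : ((u ++ w).filter (fun c => c != ".")).length = u.length := by
    rw [List.filter_append, hfu, hfw]; simp
  rw [hn, List.take_left' rfl, List.drop_left' rfl, List.filter_reverse, hfw]
  have h1 : pvFillB (u ++ []) [].reverse = u ++ pvFillB [] [].reverse :=
    pvFillB_append_nondot u [] _ hu
  simp only [List.append_nil] at h1
  rw [h1]
  have h2 : List.replicate ((u ++ w).length - u.length) ("." : String) = w := by
    symm
    rw [List.eq_replicate_iff]
    exact ⟨by simp, hw⟩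
  rw [h2]
  simp [pvFillB]

-- the central invariance: B's value is unchanged by one compaction swap
-- (first dot, at |u|, swapped with the last non-dot, at |u|+1+|v|)
lemma pvAlt_swap (u v w : List String) (c : String)
    (hu : ∀ x ∈ u, x ≠ ".") (hc : c ≠ ".") (hw : ∀ x ∈ w, x = ".") :
    format_disk_alt (u ++ c :: (v ++ "." :: w)) = format_disk_alt (u ++ "." :: (v ++ c :: w)) := by
  have hfu : u.filter (fun c => c != ".") = u :=
    List.filter_eq_self.mpr (fun a ha => by simpa using hu a ha)
  have hfw : w.filter (fun c => c != ".") = [] :=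
    List.filter_eq_nil_iff.mpr (fun a ha => by simpa using hw a ha)
  have hfwr : w.reverse.filter (fun c => c != ".") = [] := by
    rw [List.filter_reverse, hfw]; rfl
  have hcb : (c != ".") = true := by simpa using hc
  set a := (v.filter (fun c => c != ".")).length with ha
  have hav : a ≤ v.length := List.length_filter_le _ _
  have hn1 : ((u ++ c :: (v ++ "." :: w)).filter (fun c => c != ".")).length
      = u.length + a + 1 := by
    simp only [List.filter_append, List.filter_cons, hfu, hfw, hcb, if_true,
      bne_self_eq_false, Bool.false_eq_true, if_false]
    simp [← ha]
    omega
  have hn2 : ((u ++ "." :: (v ++ c :: w)).filter (fun c => c != ".")).length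
      = u.length + a + 1 := by
    simp only [List.filter_append, List.filter_cons, hfu, hfw, hcb, if_true,
      bne_self_eq_false, Bool.false_eq_true, if_false]
    simp [← ha]
    omega
  rw [pvAlt_eq, pvAlt_eq, hn1, hn2]
  have h1 : u.length + a + 1 - u.length = a + 1 := by omega
  have h0 : a - v.length = 0 := by omega
  have htake : ∀ x y : String, (u ++ x :: (v ++ y :: w)).take (u.length + a + 1)
      = u ++ x :: v.take a := by
    intro x y
    rw [List.take_append, List.take_of_length_le (by omega), h1, List.take_succ_cons,
      List.take_append, h0]
    simp
  have hdrop : ∀ x y : String, (u ++ x :: (v ++ y :: w)).drop (u.length + a + 1)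
      = v.drop a ++ y :: w := by
    intro x y
    rw [List.drop_append, List.drop_of_length_le (by omega), h1, List.drop_succ_cons,
      List.drop_append, h0]
    simp
  rw [htake, hdrop, htake, hdrop]
  have hfill1 : (((v.drop a ++ "." :: w).reverse).filter (fun c => c != "."))
      = ((v.drop a).reverse).filter (fun c => c != ".") := by
    rw [List.reverse_append, List.reverse_cons, List.filter_append, List.filter_append,
      hfwr]
    simp
  have hfill2 : (((v.drop a ++ c :: w).reverse).filter (fun c => c != "."))
      = c :: (((v.drop a).reverse).filter (fun c => c != ".")) := by
    rw [List.reverse_append, List.reverse_cons, List.filter_append, List.filter_append,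
      hfwr]
    simp [hcb]
  rw [hfill1, hfill2]
  rw [pvFillB_append_nondot u _ _ hu, pvFillB_append_nondot u _ _ hu]
  have hlen : (u ++ c :: (v ++ "." :: w)).length = (u ++ "." :: (v ++ c :: w)).length := by
    simp
  rw [hlen]
  simp [pvFillB, hc]

-- any list with no dot left of a non-dot splits as non-dots ++ dots
lemma pvSorted_split (fm : List String)
    (h : ∀ p q (hp : p < fm.length) (hq : q < fm.length), p < q → fm[p] = "." → fm[q] = ".") :
    ∃ u w, fm = u ++ w ∧ (∀ x ∈ u, x ≠ ".") ∧ (∀ x ∈ w, x = ".") := by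
  induction fm with
  | nil => exact ⟨[], [], rfl, by simp, by simp⟩
  | cons c rest ih =>
    by_cases hcdot : c = "."
    · refine ⟨[], c :: rest, rfl, by simp, ?_⟩
      intro x hx
      rcases List.mem_cons.mp hx with h1 | h1
      · rw [h1, hcdot]
      · obtain ⟨q, hq, rfl⟩ := List.mem_iff_getElem.mp h1
        have := h 0 (q+1) (by simp) (by simpa using Nat.succ_lt_succ hq) (by omega)
          (by simpa using hcdot)
        simpa using this
    · obtain ⟨u, w, hfm, hu, hw⟩ := ih (by
        intro p q hp hq hpq hpd
        have := h (p+1) (q+1) (by simpa using Nat.succ_lt_succ hp)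
          (by simpa using Nat.succ_lt_succ hq) (by omega) (by simpa using hpd)
        simpa using this)
      refine ⟨c :: u, w, by rw [hfm, List.cons_append], ?_, hw⟩
      intro x hx
      rcases List.mem_cons.mp hx with h1 | h1
      · rw [h1]; exact hcdot
      · exact hu x h1

-- specification of the inner while loop of A
lemma pvWhileA_spec (fuel : Nat) : ∀ (fm : List String) (i : Nat) (j : Int),
    (((i : Int) - j).toNat < fuel) →
    0 ≤ j →
    (hiL : i < fm.length) →
    fm[i] ≠ "." →
    (∀ (p : Nat) (hp : p < fm.length), (p : Int) < j → fm[p] ≠ ".") →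
    (∀ (p : Nat) (hp : p < fm.length), (i : Int) < p → fm[p] ≠ "." → (p : Int) ≤ j) →
    format_disk_alt (pvWhileA fm (i : Int) j fuel).1 = format_disk_alt fm ∧
    (pvWhileA fm (i : Int) j fuel).1.length = fm.length ∧
    0 ≤ (pvWhileA fm (i : Int) j fuel).2 ∧
    (∀ (p : Nat) (hp : p < (pvWhileA fm (i : Int) j fuel).1.length),
      (p : Int) < (pvWhileA fm (i : Int) j fuel).2 → (pvWhileA fm (i : Int) j fuel).1[p] ≠ ".") ∧
    (∀ (p : Nat) (hp : p < (pvWhileA fm (i : Int) j fuel).1.length),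
      (i : Int) ≤ p → (pvWhileA fm (i : Int) j fuel).1[p] ≠ "." →
        (p : Int) ≤ (pvWhileA fm (i : Int) j fuel).2) := by
  induction fuel with
  | zero => intro fm i j hfuel; omega
  | succ fuel ih =>
    intro fm i j hfuel hj0 hiL hfi hInv1 hInv2
    by_cases hexit : j ≥ (fm.length : Int) - 1 ∨ j ≥ (i : Int)
    · have hred : pvWhileA fm (i : Int) j (fuel+1) = (fm, j) := by
        simp only [pvWhileA, if_pos hexit]
      rw [hred]
      refine ⟨rfl, rfl, hj0, hInv1, ?_⟩
      intro p hp hip hpd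
      rcases hexit with hx | hx
      · have : (p : Int) < (fm.length : Int) := by exact_mod_cast hp
        omega
      · rcases lt_or_eq_of_le hip with hlt | heq
        · exact hInv2 p hp hlt hpd
        · omega
    · push_neg at hexit
      obtain ⟨hjL, hji⟩ := hexit
      have hmin : min ((fm.length : Int) - 1) (j + 1) = j + 1 := min_eq_right (by omega)
      have hjnL : j.toNat < fm.length := by omega
      have hji' : j.toNat < i := by omega
      by_cases hswap : PySem.List.pyGetD fm j "" = "." ∧ j < (i : Int)
      · -- swap branch
        have hred : pvWhileA fm (i : Int) j (fuel+1) = (pvSwapA fm (i : Int) j, j + 1) := by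
          simp only [pvWhileA]
          rw [if_neg (by omega : ¬(j ≥ (fm.length : Int) - 1 ∨ j ≥ (i : Int))), if_pos hswap,
            hmin]
        rw [hred]
        have hget_j : PySem.List.pyGetD fm j "" = fm[j.toNat] :=
          PySem.List.pyGetD_eq_getElem fm "" hj0 (by omega)
        have hget_i : PySem.List.pyGetD fm (i : Int) "" = fm[i] := by
          rw [PySem.List.pyGetD_natCast]
          exact List.getD_eq_getElem fm "" hiL
        have hfmj : fm[j.toNat] = "." := by rw [← hget_j]; exact hswap.1
        set u := fm.take j.toNat with hudef
        set v := (fm.drop (j.toNat+1)).take (i - j.toNat - 1) with hvdef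
        set w := fm.drop (i+1) with hwdef
        have hul : u.length = j.toNat := by
          rw [hudef, List.length_take]; omega
        have hvl : v.length = i - j.toNat - 1 := by
          rw [hvdef, List.length_take, List.length_drop]; omega
        have hwl : w.length = fm.length - i - 1 := by
          rw [hwdef, List.length_drop]; omega
        have hfm : fm = u ++ "." :: (v ++ fm[i] :: w) := by
          conv_lhs => rw [← List.take_append_drop j.toNat fm]
          rw [← hudef]
          congr 1
          rw [List.drop_eq_getElem_cons hjnL, hfmj]
          congr 1
          conv_lhs => rw [← List.take_append_drop (i - j.toNat - 1) (List.drop (j.toNat+1) fm)]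
          rw [← hvdef]
          congr 1
          rw [List.drop_drop]
          have h1 : j.toNat + 1 + (i - j.toNat - 1) = i := by omega
          rw [h1, List.drop_eq_getElem_cons hiL]
        have hunondot : ∀ x ∈ u, x ≠ "." := by
          intro x hx
          obtain ⟨p, hp, rfl⟩ := List.mem_iff_getElem.mp hx
          have hpl : p < fm.length := by rw [hul] at hp; omega
          have hgu : u[p] = fm[p] := List.getElem_take
          rw [hgu]
          exact hInv1 p hpl (by rw [hul] at hp; omega)
        have hwdot : ∀ x ∈ w, x = "." := by
          intro x hx
          obtain ⟨q, hq, rfl⟩ := List.mem_iff_getElem.mp hx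
          have hql : i + 1 + q < fm.length := by rw [hwl] at hq; omega
          have hgw : w[q] = fm[i+1+q] := List.getElem_drop ..
          rw [hgw]
          by_contra hnd
          have := hInv2 (i+1+q) hql (by push_cast; omega) hnd
          omega
        have htk : List.take i fm = u ++ "." :: v := by
          conv_lhs => rw [hfm]
          rw [List.take_append, List.take_of_length_le (by omega)]
          have h1 : i - u.length = v.length + 1 := by omega
          rw [h1, List.take_succ_cons, List.take_append, List.take_of_length_le (le_refl v.length)]
          simp
        have hdk : List.drop (i+1) fm = w := by
          conv_lhs => rw [hfm]
          rw [List.drop_append, List.drop_of_length_le (by omega)]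
          have h1 : i + 1 - u.length = v.length + 2 := by omega
          rw [h1]
          simp only [List.drop_succ_cons]
          rw [List.drop_append, List.drop_of_length_le (by omega : v.length ≤ v.length + 1)]
          have h2 : v.length + 1 - v.length = 1 := by omega
          rw [h2]
          simp
        have hswapped : pvSwapA fm (i : Int) j = u ++ fm[i] :: (v ++ "." :: w) := by
          unfold pvSwapA
          rw [hget_j, hget_i, hfmj]
          have hti : ((i : Int)).toNat = i := by omega
          rw [hti]
          have hset1 : fm.set i "." = u ++ "." :: (v ++ "." :: w) := by
            rw [List.set_eq_take_append_cons_drop, if_pos hiL, htk, hdk]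
            simp
          rw [hset1, List.set_eq_take_append_cons_drop,
            if_pos (by simp only [List.length_append, List.length_cons, hul]; omega :
              j.toNat < (u ++ "." :: (v ++ "." :: w)).length)]
          have ht2 : List.take j.toNat (u ++ "." :: (v ++ "." :: w)) = u :=
            List.take_left' hul
          have hd2 : List.drop (j.toNat + 1) (u ++ "." :: (v ++ "." :: w)) = v ++ "." :: w := by
            rw [List.drop_append, List.drop_of_length_le (by omega)]
            have : j.toNat + 1 - u.length = 1 := by omega
            rw [this]
            simp
          rw [ht2, hd2]
        refine ⟨?_, ?_, by omega, ?_, ?_⟩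
        · rw [hswapped, pvAlt_swap u v w (fm[i]) hunondot hfi hwdot, ← hfm]
        · simp [pvSwapA]
        · intro p hp hpj
          simp only [pvSwapA, List.length_set] at hp
          have hgp : (pvSwapA fm (i : Int) j)[p]'(by simp [pvSwapA]; exact hp) =
              if j.toNat = p then fm[i] else if i = p then ("." : String) else fm[p]'hp := by
            unfold pvSwapA
            rw [List.getElem_set, List.getElem_set]
            have hti : ((i : Int)).toNat = i := by omega
            simp only [hti, hget_i, hget_j, hfmj]
          rw [hgp]
          by_cases hpj' : j.toNat = p
          · rw [if_pos hpj']; exact hfi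
          · rw [if_neg hpj', if_neg (by omega)]
            exact hInv1 p hp (by omega)
        · intro p hp hip hpd
          simp only [pvSwapA, List.length_set] at hp
          have hgp : (pvSwapA fm (i : Int) j)[p]'(by simp [pvSwapA]; exact hp) =
              if j.toNat = p then fm[i] else if i = p then ("." : String) else fm[p]'hp := by
            unfold pvSwapA
            rw [List.getElem_set, List.getElem_set]
            have hti : ((i : Int)).toNat = i := by omega
            simp only [hti, hget_i, hget_j, hfmj]
          rw [hgp] at hpd
          rcases Nat.lt_or_ge i p with hlt | hge
          · rw [if_neg (by omega), if_neg (by omega)] at hpd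
            have := hInv2 p hp (by push_cast; omega) hpd
            omega
          · have hpi : p = i := by push_cast at hip; omega
            rw [if_neg (by omega), if_pos hpi.symm] at hpd
            exact absurd rfl hpd
      · -- scan-forward branch
        have hred : pvWhileA fm (i : Int) j (fuel+1)
            = pvWhileA fm (i : Int) (j+1) fuel := by
          simp only [pvWhileA]
          rw [if_neg (by omega : ¬(j ≥ (fm.length : Int) - 1 ∨ j ≥ (i : Int))), if_neg hswap,
            hmin]
        rw [hred]
        have hfmj : fm[j.toNat] ≠ "." := by
          intro hdot
          exact hswap ⟨by
            rw [PySem.List.pyGetD_eq_getElem fm "" hj0 (by omega)]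
            exact hdot, hji⟩
        exact ih fm i (j+1) (by omega) (by omega) hiL hfi
          (by
            intro p hp hpj
            by_cases hpj' : (p : Int) < j
            · exact hInv1 p hp hpj'
            · have hpn : p = j.toNat := by omega
              subst hpn; exact hfmj)
          (by
            intro p hp hip hpd
            have := hInv2 p hp hip hpd
            omega)

-- specification of the outer countdown loop of A
lemma pvOuter_spec (k : Nat) : ∀ (fm : List String) (j : Int),
    ((k : Int) ≤ (fm.length : Int) - 1) →
    0 ≤ j →
    (∀ (p : Nat) (hp : p < fm.length), (p : Int) < j → fm[p] ≠ ".") →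
    (∀ (p : Nat) (hp : p < fm.length), (k : Int) < p → fm[p] ≠ "." → (p : Int) ≤ j) →
    format_disk_alt ((PySem.List.pyRange (k : Int) 0 (-1)).foldl
      (fun (st : List String × Int) i =>
        if PySem.List.pyGetD st.1 i "" ≠ "." then pvWhileA st.1 i st.2 (st.1.length + 1) else st)
      (fm, j)).1 = format_disk_alt fm ∧
    (∀ (p q : Nat)
      (hp : p < ((PySem.List.pyRange (k : Int) 0 (-1)).foldl
        (fun (st : List String × Int) i =>
          if PySem.List.pyGetD st.1 i "" ≠ "." then pvWhileA st.1 i st.2 (st.1.length + 1) else st)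
        (fm, j)).1.length)
      (hq : q < ((PySem.List.pyRange (k : Int) 0 (-1)).foldl
        (fun (st : List String × Int) i =>
          if PySem.List.pyGetD st.1 i "" ≠ "." then pvWhileA st.1 i st.2 (st.1.length + 1) else st)
        (fm, j)).1.length),
      p < q →
      ((PySem.List.pyRange (k : Int) 0 (-1)).foldl
        (fun (st : List String × Int) i =>
          if PySem.List.pyGetD st.1 i "" ≠ "." then pvWhileA st.1 i st.2 (st.1.length + 1) else st)
        (fm, j)).1[p] = "." →
      ((PySem.List.pyRange (k : Int) 0 (-1)).foldl
        (fun (st : List String × Int) i =>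
          if PySem.List.pyGetD st.1 i "" ≠ "." then pvWhileA st.1 i st.2 (st.1.length + 1) else st)
        (fm, j)).1[q] = ".") := by
  induction k with
  | zero =>
    intro fm j hk hj0 hInv1 hInv2
    rw [PySem.List.pyRange_neg_one_eq_nil (by norm_num)]
    refine ⟨rfl, ?_⟩
    intro p q hp hq hpq hpd
    by_contra hqd
    have hqj := hInv2 q hq (by push_cast; omega) hqd
    have := hInv1 p hp (by push_cast; omega)
    exact this hpd
  | succ k ih =>
    intro fm j hk hj0 hInv1 hInv2
    have hcast : ((k + 1 : Nat) : Int) = (k : Int) + 1 := by push_cast; ring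
    rw [hcast, PySem.List.pyRange_neg_one_cons (by omega)]
    simp only [List.foldl_cons]
    have hstep : ((k : Int) + 1 - 1) = (k : Int) := by omega
    rw [hstep]
    by_cases hdot : PySem.List.pyGetD fm ((k : Int) + 1) "" ≠ "."
    · simp only [if_pos hdot]
      have hk1L : k + 1 < fm.length := by omega
      have harg : ((k : Int) + 1) = ((k + 1 : Nat) : Int) := by push_cast; ring
      have hfi : fm[k+1] ≠ "." := by
        rw [harg, PySem.List.pyGetD_natCast] at hdot
        rwa [List.getD_eq_getElem fm "" hk1L] at hdot
      simp only [harg]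
      have hw := pvWhileA_spec (fm.length + 1) fm (k+1) j (by omega) hj0 hk1L hfi hInv1
        (by
          intro p hp hip hpd
          exact hInv2 p hp (by push_cast at hip ⊢; omega) hpd)
      obtain ⟨he, hlen, hj0', hI1, hI2⟩ := hw
      have hrec := ih (pvWhileA fm ((k+1 : Nat) : Int) j (fm.length+1)).1
        (pvWhileA fm ((k+1 : Nat) : Int) j (fm.length+1)).2
        (by rw [hlen]; omega) hj0' hI1
        (by
          intro p hp hip hpd
          exact hI2 p hp (by push_cast at hip ⊢; omega) hpd)
      refine ⟨?_, hrec.2⟩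
      rw [hrec.1, he]
    · simp only [if_neg hdot]
      push_neg at hdot
      have hfmk : ∀ (hp : k + 1 < fm.length), fm[k+1] = "." := by
        intro hp
        have harg : ((k : Int) + 1) = ((k + 1 : Nat) : Int) := by push_cast; ring
        rw [harg, PySem.List.pyGetD_natCast] at hdot
        rwa [List.getD_eq_getElem fm "" hp] at hdot
      exact ih fm j (by omega) hj0 hInv1
        (by
          intro p hp hip hpd
          rcases Nat.lt_or_ge (k+1) p with hlt | hge
          · exact hInv2 p hp (by push_cast; omega) hpd
          · have hpk : p = k + 1 := by push_cast at hip; omega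
            subst hpk
            exact absurd (hfmk (by omega)) hpd)

-- ===== VERDICT (by name: the statement is the Claim_ definition above) =====
theorem format_disk_spec : Claim_equal_format_disk := by
  intro disk _
  unfold Spec_format_disk format_disk
  simp only [PySem.List.foldl_append_singleton, List.nil_append]
  rcases Nat.eq_zero_or_pos disk.length with hL | hL
  · have hdisk : disk = [] := List.eq_nil_of_length_eq_zero hL
    subst hdisk
    simp only [List.length_nil]
    rw [PySem.List.pyRange_neg_one_eq_nil (by norm_num)]
    simp only [format_disk_alt, PySem.List.count_eq, List.length_nil]
    rfl
  · have hcast : ((disk.length : Int) - 1) = ((disk.length - 1 : Nat) : Int) := by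
      push_cast; omega
    rw [hcast]
    have h := pvOuter_spec (disk.length - 1) disk 0 (by push_cast; omega) le_rfl
      (by intro p hp hpj; omega)
      (by intro p hp hip _; push_cast at hip; omega)
    obtain ⟨he, hsorted⟩ := h
    obtain ⟨u, w, hfm, hu, hw⟩ := pvSorted_split _ hsorted
    rw [hfm] at he ⊢
    rw [pvAlt_sorted_fix u w hu hw] at he
    exact he
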